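-- pv_equiv track=rewrite | github.com/nshirinli/Nsh_blog | app/controllers/optimization_controller.py | _parse_bounds_dict
-- ===== SOURCE A (Python) =====
-- def _parse_bounds_dict(bounds_text: str, var_names: list[str]) -> tuple[list, list]:
--     """Return (lb, ub) lists aligned to var_names. None means Inf/-Inf."""
--     lb = [None] * len(var_names)
--     ub = [None] * len(var_names)
--     for line in bounds_text.splitlines():
--         line = line.strip()
--         if not line or ":" not in line:
--             continue
--         name, rest = line.split(":", 1)
--         name = name.strip()
--         if name not in var_names:
--             continue
--         idx = var_names.index(name)
--         parts = [p.strip() for p in rest.split(",")]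
--         if len(parts) >= 1 and parts[0].lower() not in ("none", ""):
--             lb[idx] = parts[0]
--         if len(parts) >= 2 and parts[1].lower() not in ("none", ""):
--             ub[idx] = parts[1]
--     return lb, ub
-- ===== SOURCE B (Python) =====
-- def _parse_bounds_dict(bounds_text: str, var_names: list[str]) -> tuple[list, list]:
--     """Return (lb, ub) lists aligned to var_names. None means Inf/-Inf."""
--     # Pre-parse every usable line into (name, parts) records, newest first;
--     # each output cell is then the first record (scanning backwards) whose
--     # field passes the none/empty guard.  Last-writer-wins falls out of the
--     # backward first-match search, per field independently.
--     recs = []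
--     for raw in bounds_text.splitlines():
--         line = raw.strip()
--         if line and ":" in line:
--             name, rest = line.split(":", 1)
--             recs.append((name.strip(), [p.strip() for p in rest.split(",")]))
--     recs.reverse()
--
--     def pick(name, k):
--         for n, parts in recs:
--             if n == name and k < len(parts) and parts[k].lower() not in ("none", ""):
--                 return parts[k]
--         return None
--
--     return [pick(n, 0) for n in var_names], [pick(n, 1) for n in var_names]
-- ===== Notes on version B (the rewrite author's own statement) =====
-- stated objective: alternative
-- what changed: Replaces A's write-into-preallocated-position loop (list.index + in-place set per line) with pre-parsing all lines into (name, parts) records, reversing them, and answering each output cell by a backward first-match search per variable per field.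
-- outside the precondition, e.g. on _parse_bounds_dict('x: 1, 2', ['x', 'x']): A returns (['1', None], ['2', None]), B returns (['1', '1'], ['2', '2'])
import Mathlib
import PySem

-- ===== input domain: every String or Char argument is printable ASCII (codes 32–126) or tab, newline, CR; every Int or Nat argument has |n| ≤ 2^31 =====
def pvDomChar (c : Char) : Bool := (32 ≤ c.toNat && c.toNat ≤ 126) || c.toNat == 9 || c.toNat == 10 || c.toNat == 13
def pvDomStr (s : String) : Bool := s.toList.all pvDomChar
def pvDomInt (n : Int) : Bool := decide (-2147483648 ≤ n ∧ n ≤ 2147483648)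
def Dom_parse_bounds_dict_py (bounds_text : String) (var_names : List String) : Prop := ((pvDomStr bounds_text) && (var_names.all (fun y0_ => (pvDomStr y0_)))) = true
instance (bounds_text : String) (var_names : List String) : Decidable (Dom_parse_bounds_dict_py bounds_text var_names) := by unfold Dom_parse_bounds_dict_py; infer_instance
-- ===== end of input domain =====

-- B replaces A's write-into-preallocated-position loop with pre-parsed records searched backwards per field (return value only; an alternative decomposition, not claimed faster).


-- ===== PORT A =====
-- one iteration of A's for-loop: state = (lb, ub)
def pbStepA (vn : List String) (st : List (Option String) × List (Option String)) (line0 : String) :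
    List (Option String) × List (Option String) :=
  let line := PySem.Str.strip line0
  if line = "" ∨ PySem.Str.isIn ":" line = false then st else
  let pieces := (PySem.Str.splitMax? line ":" 1).getD []   -- name, rest = line.split(":", 1): 2 pieces since ":" in line
  let name := PySem.Str.strip (pieces.getD 0 "")
  let rest := pieces.getD 1 ""
  match PySem.List.index? vn name with
  | none => st                                             -- name not in var_names: continue
  | some idx =>
    let parts := ((PySem.Str.split? rest ",").getD []).map PySem.Str.strip
    let lb := if 1 ≤ parts.length ∧ ¬(PySem.Str.lower (parts.getD 0 "") = "none" ∨ PySem.Str.lower (parts.getD 0 "") = "") then st.1.set idx (some (parts.getD 0 "")) else st.1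
    let ub := if 2 ≤ parts.length ∧ ¬(PySem.Str.lower (parts.getD 1 "") = "none" ∨ PySem.Str.lower (parts.getD 1 "") = "") then st.2.set idx (some (parts.getD 1 "")) else st.2
    (lb, ub)

def parse_bounds_dict_py (bounds_text : String) (var_names : List String) : List (Option String) × List (Option String) :=
  (PySem.Str.splitlines bounds_text).foldl (pbStepA var_names)
    (List.replicate var_names.length none, List.replicate var_names.length none)

-- ===== PORT B =====
-- parse one raw line into a (name, parts) record, or none if the line is skipped
def pbParseLine (raw : String) : Option (String × List String) :=
  let line := PySem.Str.strip raw
  if line = "" ∨ PySem.Str.isIn ":" line = false then none else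
  let pieces := (PySem.Str.splitMax? line ":" 1).getD []
  some (PySem.Str.strip (pieces.getD 0 ""),
        ((PySem.Str.split? (pieces.getD 1 "") ",").getD []).map PySem.Str.strip)

-- backward first-match search: first record (newest first) whose field k passes the guard
def pbPick (recs : List (String × List String)) (name : String) (k : Nat) : Option String :=
  match recs with
  | [] => none
  | (n, parts) :: t =>
    if n = name ∧ k < parts.length ∧ ¬(PySem.Str.lower (parts.getD k "") = "none" ∨ PySem.Str.lower (parts.getD k "") = "")
    then some (parts.getD k "") else pbPick t name k

def parse_bounds_dict_py_alt (bounds_text : String) (var_names : List String) : List (Option String) × List (Option String) :=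
  let recs := ((PySem.Str.splitlines bounds_text).foldl
      (fun acc raw => match pbParseLine raw with | some r => acc ++ [r] | none => acc) []).reverse
  (var_names.map (fun n => pbPick recs n 0), var_names.map (fun n => pbPick recs n 1))

-- ===== PRECONDITION & SPEC =====
-- Pre_ excludes var_names lists with duplicate entries: there A's list.index fills only the
-- first occurrence of a name while B's per-name search fills every occurrence — a corner
-- (duplicate keys) on which either behaviour is defensible and A's is accidental.
def Pre_parse_bounds_dict_py (bounds_text : String) (var_names : List String) : Prop := var_names.Nodup
instance (bounds_text : String) (var_names : List String) : Decidable (Pre_parse_bounds_dict_py bounds_text var_names) := by unfold Pre_parse_bounds_dict_py; infer_instance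
def pvWitness_parse_bounds_dict_py : String × List String := ("x: 1, 2\ny: none, 3", ["x", "y"])

def Spec_parse_bounds_dict_py (bounds_text : String) (var_names : List String) (out : List (Option String) × List (Option String)) : Prop := out = parse_bounds_dict_py_alt bounds_text var_names
instance (bounds_text : String) (var_names : List String) (out : List (Option String) × List (Option String)) : Decidable (Spec_parse_bounds_dict_py bounds_text var_names out) := by unfold Spec_parse_bounds_dict_py; infer_instance

-- ===== CLAIM (what is proved, stated in full; the proofs are below) =====
def Claim_equal_parse_bounds_dict_py : Prop := ∀ (bounds_text : String) (var_names : List String), Dom_parse_bounds_dict_py bounds_text var_names → Pre_parse_bounds_dict_py bounds_text var_names → Spec_parse_bounds_dict_py bounds_text var_names (parse_bounds_dict_py bounds_text var_names)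

-- ===== LEMMAS AND PROOFS =====

-- proof-side restatement of A's loop body on an already-parsed record
def pbApply (vn : List String) (st : List (Option String) × List (Option String))
    (r : String × List String) : List (Option String) × List (Option String) :=
  (PySem.List.index? vn r.1).elim st (fun idx =>
    (if 1 ≤ r.2.length ∧ ¬(PySem.Str.lower (r.2.getD 0 "") = "none" ∨ PySem.Str.lower (r.2.getD 0 "") = "") then st.1.set idx (some (r.2.getD 0 "")) else st.1,
     if 2 ≤ r.2.length ∧ ¬(PySem.Str.lower (r.2.getD 1 "") = "none" ∨ PySem.Str.lower (r.2.getD 1 "") = "") then st.2.set idx (some (r.2.getD 1 "")) else st.2))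

lemma pbStepA_eq (vn : List String) (st : List (Option String) × List (Option String)) (line0 : String) :
    pbStepA vn st line0 = (pbParseLine line0).elim st (pbApply vn st) := by
  simp only [pbStepA, pbParseLine]
  by_cases h : PySem.Str.strip line0 = "" ∨ PySem.Str.isIn ":" (PySem.Str.strip line0) = false
  · rw [if_pos h, if_pos h]; rfl
  · rw [if_neg h, if_neg h, Option.elim_some]
    generalize List.map PySem.Str.strip ((PySem.Str.split? (((PySem.Str.splitMax? (PySem.Str.strip line0) ":" 1).getD []).getD 1 "") ",").getD []) = ps
    generalize PySem.Str.strip (((PySem.Str.splitMax? (PySem.Str.strip line0) ":" 1).getD []).getD 0 "") = nm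
    simp only [pbApply]
    cases PySem.List.index? vn nm <;> rfl

-- B's record-building loop is filterMap
lemma pb_recs_foldl (lines : List String) :
    ∀ acc, lines.foldl (fun acc raw => match pbParseLine raw with | some r => acc ++ [r] | none => acc) acc
      = acc ++ lines.filterMap pbParseLine := by
  induction lines with
  | nil => intro acc; simp
  | cons l t ih =>
    intro acc
    cases h : pbParseLine l with
    | none => simp [List.foldl, h, ih]
    | some r => simp [List.foldl, h, ih]

-- A's fold over raw lines is the fold of pbApply over the parsed records
lemma pb_foldlA_eq (vn : List String) (lines : List String) :
    ∀ st, lines.foldl (pbStepA vn) st = (lines.filterMap pbParseLine).foldl (pbApply vn) st := by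
  induction lines with
  | nil => intro st; rfl
  | cons l t ih =>
    intro st
    cases h : pbParseLine l with
    | none => simp [List.foldl, pbStepA_eq, h, ih]
    | some r => simp [List.foldl, pbStepA_eq, h, ih]

lemma pbPick_append (l₁ l₂ : List (String × List String)) (n : String) (k : Nat) :
    pbPick (l₁ ++ l₂) n k = (pbPick l₁ n k).or (pbPick l₂ n k) := by
  induction l₁ with
  | nil => simp [pbPick]
  | cons r t ih =>
    obtain ⟨m, parts⟩ := r
    show pbPick ((m, parts) :: (t ++ l₂)) n k = _
    rw [pbPick, pbPick]
    split
    · rfl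
    · exact ih

lemma pbPick_single (m : String) (parts : List String) (n : String) (k : Nat) :
    pbPick [(m, parts)] n k =
      (if m = n ∧ k < parts.length ∧ ¬(PySem.Str.lower (parts.getD k "") = "none" ∨ PySem.Str.lower (parts.getD k "") = "") then some (parts.getD k "") else none) := by
  simp only [pbPick]

-- mapping a function that differs from h only at `name` equals the old map with the (unique) position of `name` overwritten
lemma pb_map_update {α : Type} (ns : List String) (name : String) (idx : Nat)
    (h h' : String → α) (hnd : ns.Nodup)
    (hix : PySem.List.index? ns name = some idx)
    (hagree : ∀ n, n ≠ name → h' n = h n) :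
    ns.map h' = (ns.map h).set idx (h' name) := by
  induction ns generalizing idx with
  | nil => simp [PySem.List.index?_eq_idxOf?] at hix
  | cons a t ih =>
    by_cases ha : a = name
    · subst ha
      rw [PySem.List.index?_cons_self] at hix
      injection hix with hix; subst hix
      simp only [List.map_cons, List.set]
      congr 1
      exact List.map_congr_left (fun n hn => hagree n (by rintro rfl; exact (List.nodup_cons.mp hnd).1 hn))
    · rw [PySem.List.index?_cons_of_ne t ha] at hix
      cases hj : PySem.List.index? t name with
      | none => rw [hj] at hix; simp at hix
      | some j =>
        rw [hj] at hix
        simp only [Option.map_some] at hix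
        injection hix with hix; subst hix
        simp only [List.map_cons, List.set, hagree a ha]
        congr 1
        exact ih j (List.nodup_cons.mp hnd).2 hj

-- one pbApply step, expressed as a pointwise update of the per-name functions
lemma pbApply_map (vn : List String) (hnd : vn.Nodup) (name : String) (parts : List String)
    (h1 h2 : String → Option String) :
    pbApply vn (vn.map h1, vn.map h2) (name, parts)
      = (vn.map (fun n => (pbPick [(name, parts)] n 0).or (h1 n)),
         vn.map (fun n => (pbPick [(name, parts)] n 1).or (h2 n))) := by
  have key : ∀ (k : Nat) (h : String → Option String) (idx : Nat),
      PySem.List.index? vn name = some idx →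
      vn.map (fun n => (pbPick [(name, parts)] n k).or (h n)) =
      (if k + 1 ≤ parts.length ∧ ¬(PySem.Str.lower (parts.getD k "") = "none" ∨ PySem.Str.lower (parts.getD k "") = "") then (vn.map h).set idx (some (parts.getD k "")) else vn.map h) := by
    intro k h idx hix
    obtain ⟨hk, hvk, -⟩ := PySem.List.getElem_of_index?_eq_some hix
    have hklen : idx < vn.length := by simpa using hk
    have hupd := pb_map_update vn name idx h (fun n => (pbPick [(name, parts)] n k).or (h n)) hnd hix
      (fun n hne => by
        show (pbPick [(name, parts)] n k).or (h n) = h n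
        rw [pbPick_single, if_neg (by rintro ⟨rfl, -⟩; exact hne rfl), Option.none_or])
    rw [hupd]
    show (vn.map h).set idx ((pbPick [(name, parts)] name k).or (h name)) = _
    rw [pbPick_single]
    by_cases hg : k < parts.length ∧ ¬(PySem.Str.lower (parts.getD k "") = "none" ∨ PySem.Str.lower (parts.getD k "") = "")
    · rw [if_pos ⟨rfl, hg.1, hg.2⟩, if_pos ⟨hg.1, hg.2⟩, Option.some_or]
    · rw [if_neg (fun hc => hg ⟨hc.2.1, hc.2.2⟩), if_neg (fun hc => hg ⟨hc.1, hc.2⟩), Option.none_or]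
      conv_lhs => rw [← hvk]
      rw [← List.getElem_map h (h := by simpa using hklen)]
      exact List.set_getElem_self _
  show (PySem.List.index? vn name).elim _ _ = _
  cases hix : PySem.List.index? vn name with
  | none =>
    have hnm : name ∉ vn := (PySem.List.index?_eq_none_iff vn name).mp hix
    rw [Option.elim_none]
    refine Prod.ext ?_ ?_ <;>
    · refine (List.map_congr_left (fun n hn => ?_)).symm
      rw [pbPick_single, if_neg (by rintro ⟨rfl, -⟩; exact hnm hn), Option.none_or]
  | some idx =>
    rw [Option.elim_some]
    exact Prod.ext (by rw [key 0 h1 idx hix]) (by rw [key 1 h2 idx hix])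

-- folding pbApply forwards = backward first-match search over the reversed records
lemma pb_main (vn : List String) (hnd : vn.Nodup) :
    ∀ (recs : List (String × List String)) (h1 h2 : String → Option String),
      recs.foldl (pbApply vn) (vn.map h1, vn.map h2)
        = (vn.map (fun n => (pbPick recs.reverse n 0).or (h1 n)),
           vn.map (fun n => (pbPick recs.reverse n 1).or (h2 n))) := by
  intro recs
  induction recs with
  | nil => intro h1 h2; simp [pbPick]
  | cons r t ih =>
    intro h1 h2
    obtain ⟨name, parts⟩ := r
    rw [List.foldl_cons, pbApply_map vn hnd name parts h1 h2, ih]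
    simp only [List.reverse_cons, pbPick_append, Option.or_assoc]

-- ===== VERDICT (by name: the statement is the Claim_ definition above) =====
theorem parse_bounds_dict_py_spec : Claim_equal_parse_bounds_dict_py := by
  intro bounds_text var_names _ hpre
  unfold Spec_parse_bounds_dict_py parse_bounds_dict_py parse_bounds_dict_py_alt
  rw [pb_foldlA_eq, pb_recs_foldl, List.nil_append,
      show (List.replicate var_names.length (none : Option String), List.replicate var_names.length (none : Option String))
         = (var_names.map (fun _ => (none : Option String)), var_names.map (fun _ => (none : Option String))) by
        simp [List.map_const'],
      pb_main var_names hpre]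
  simp [Option.or_none]
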